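-- pv_equiv track=rewrite | github.com/omermad73/Computer-Networks-Design-Project | Switch3.py | top_prioritys
-- ===== SOURCE A (Python) =====
-- def top_prioritys(queue):
--     # only this first message in each priority
--     tupel_packets = queue
--     used_priorities = {}
--
--     for packet in tupel_packets:
--         if packet[0] not in used_priorities:
--             used_priorities[packet[0]] = packet
--         elif used_priorities[packet[0]][1] > packet[1]:
--             used_priorities[packet[0]] = packet
--
--     return used_priorities
-- ===== SOURCE B (Python) =====
-- def top_prioritys(queue):
--     # Group-then-reduce: one grouping pass, then first-min by second element per group.
--     groups = {}
--     for packet in queue: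
--         groups.setdefault(packet[0], []).append(packet)
--     return {pr: min(pkts, key=lambda p: p[1]) for pr, pkts in groups.items()}
-- ===== Notes on version B (the rewrite author's own statement) =====
-- stated objective: alternative
-- what changed: Replaces the single running-minimum dict update loop by a group-by pass (priority -> list of packets) followed by a per-group min(key=second) reduction, relying on min's first-minimum tie-break and dict insertion order.
import Mathlib
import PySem

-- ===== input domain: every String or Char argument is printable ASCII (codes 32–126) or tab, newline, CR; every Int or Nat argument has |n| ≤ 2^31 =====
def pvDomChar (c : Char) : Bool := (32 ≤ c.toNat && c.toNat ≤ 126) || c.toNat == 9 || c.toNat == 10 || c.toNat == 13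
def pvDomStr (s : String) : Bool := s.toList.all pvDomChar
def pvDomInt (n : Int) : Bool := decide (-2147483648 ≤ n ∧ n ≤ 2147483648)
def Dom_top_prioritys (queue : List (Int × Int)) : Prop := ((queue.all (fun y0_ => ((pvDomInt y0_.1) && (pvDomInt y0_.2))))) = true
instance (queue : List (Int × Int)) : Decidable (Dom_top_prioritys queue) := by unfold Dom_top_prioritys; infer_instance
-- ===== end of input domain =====

-- B replaces A's single running-minimum dict loop by a group-by pass followed by a
-- per-group min(key=second) reduction (objective: alternative decomposition, same cost).

-- ===== PORT A =====
-- A: one pass keeping, per priority, the first packet with the (strictly) smallest second element.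
def top_prioritys (queue : List (Int × Int)) : List (Int × Int × Int) :=
  (queue.foldl
    (fun d packet =>
      match d.get? packet.1 with
      | none => d.insert packet.1 packet
      | some cur => if cur.2 > packet.2 then d.insert packet.1 packet else d)
    (PySem.Dict.empty : PySem.Dict Int (Int × Int))).items

-- ===== PORT B =====
-- groups.setdefault(packet[0], []).append(packet) = modify key [] (· ++ [packet])
def pvGroups (queue : List (Int × Int)) : PySem.Dict Int (List (Int × Int)) :=
  queue.foldl (fun d packet => d.modify packet.1 [] (· ++ [packet])) PySem.Dict.empty

-- min(pkts, key=lambda p: p[1]); the 'none' branch (Python: ValueError on empty) is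
-- unreachable because every group built by pvGroups is nonempty.
def pvMinSnd (pkts : List (Int × Int)) : Int × Int :=
  match PySem.List.min? pkts (·.2) with
  | some m => m
  | none => (0, 0)

def top_prioritys_alt (queue : List (Int × Int)) : List (Int × Int × Int) :=
  (pvGroups queue).items.map (fun kv => (kv.1, pvMinSnd kv.2))

-- ===== PRECONDITION & SPEC =====
def Spec_top_prioritys (queue : List (Int × Int)) (out : List (Int × Int × Int)) : Prop := out = top_prioritys_alt queue
instance (queue : List (Int × Int)) (out : List (Int × Int × Int)) : Decidable (Spec_top_prioritys queue out) := by unfold Spec_top_prioritys; infer_instance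

-- ===== CLAIM (what is proved, stated in full; the proofs are below) =====
def Claim_equal_top_prioritys : Prop := ∀ (queue : List (Int × Int)), Dom_top_prioritys queue → Spec_top_prioritys queue (top_prioritys queue)

-- ===== LEMMAS AND PROOFS =====

-- A's fold, named for the induction.
def pvAFold (queue : List (Int × Int)) : PySem.Dict Int (Int × Int) :=
  queue.foldl
    (fun d packet =>
      match d.get? packet.1 with
      | none => d.insert packet.1 packet
      | some cur => if cur.2 > packet.2 then d.insert packet.1 packet else d)
    PySem.Dict.empty

theorem pvAFold_items (queue : List (Int × Int)) : top_prioritys queue = (pvAFold queue).items := rfl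

-- min over a snoc: Python's first-min update rule.
theorem pvMinSnd_append (pkts : List (Int × Int)) (p : Int × Int) (h : pkts ≠ []) :
    pvMinSnd (pkts ++ [p]) = if p.2 < (pvMinSnd pkts).2 then p else pvMinSnd pkts := by
  obtain ⟨x, t, rfl⟩ := List.exists_cons_of_ne_nil h
  have key : ∀ (l : List (Int × Int)) (m : Int × Int),
      PySem.List.min? (m :: l) (·.2) =
        some (l.foldl (fun m p => if p.2 < m.2 then p else m) m) := by
    intro l
    induction l with
    | nil => intro m; rfl
    | cons y l ih =>
        intro m
        simp only [PySem.List.min?, List.foldl_cons] at *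
        by_cases hy : y.2 < m.2 <;> simp [hy, ← ih]
  simp only [pvMinSnd, List.cons_append, key, List.foldl_append, List.foldl_cons, List.foldl_nil]

-- lookup through a key-preserving map of the items list
theorem pvGet_mk_map (l : List (Int × List (Int × Int))) (k : Int) :
    (PySem.Dict.mk (l.map (fun kv => (kv.1, pvMinSnd kv.2))) : PySem.Dict Int (Int × Int)).get? k
      = ((PySem.Dict.mk l).get? k).map pvMinSnd := by
  induction l with
  | nil => rfl
  | cons kv l ih =>
      obtain ⟨k1, v1⟩ := kv
      simp only [List.map_cons, PySem.Dict.get?_mk_cons]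
      by_cases h : k1 == k <;>
        simp only [h, if_true, if_false, Option.map_some, ih, Bool.false_eq_true]

-- main invariant: A's dict is the key-preserving min-image of B's grouping dict,
-- and every group is nonempty.
theorem pvMain (queue : List (Int × Int)) :
    (pvAFold queue).items = (pvGroups queue).items.map (fun kv => (kv.1, pvMinSnd kv.2))
      ∧ ∀ kv ∈ (pvGroups queue).items, kv.2 ≠ [] := by
  induction queue using List.reverseRecOn with
  | nil => exact ⟨rfl, by simp [pvGroups, PySem.Dict.empty]⟩
  | append_singleton q p ih =>
      obtain ⟨hitems, hne⟩ := ih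
      have hA : pvAFold (q ++ [p]) =
          (match (pvAFold q).get? p.1 with
           | none => (pvAFold q).insert p.1 p
           | some cur => if cur.2 > p.2 then (pvAFold q).insert p.1 p else pvAFold q) := by
        simp [pvAFold, List.foldl_append]
      have hB : pvGroups (q ++ [p]) = (pvGroups q).modify p.1 [] (· ++ [p]) := by
        simp [pvGroups, List.foldl_append]
      have hnodup : (pvGroups q).keys.Nodup := by
        have := PySem.Dict.nodup_keys_foldl_modify_key q (fun packet => packet.1) []
          (fun _ packet => (· ++ [packet])) PySem.Dict.empty (by simp)
        simpa [pvGroups] using this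
      have hAeq : pvAFold q = PySem.Dict.mk ((pvGroups q).items.map (fun kv => (kv.1, pvMinSnd kv.2))) := by
        apply PySem.Dict.ext
        exact hitems
      have hget : (pvAFold q).get? p.1 = ((pvGroups q).get? p.1).map pvMinSnd := by
        rw [hAeq, pvGet_mk_map]
      -- unfold modify to insert
      have hBmod : pvGroups (q ++ [p]) = (pvGroups q).insert p.1 ((pvGroups q).getD p.1 [] ++ [p]) := by
        rw [hB]; rfl
      cases hg : (pvGroups q).get? p.1 with
      | none =>
          have hcont : (pvGroups q).contains p.1 = false := by
            rw [PySem.Dict.contains_eq_isSome_get?, hg]; rfl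
          have hgd : (pvGroups q).getD p.1 [] = [] := PySem.Dict.getD_of_get?_eq_none _ _ hg
          have hAget : (pvAFold q).get? p.1 = none := by rw [hget, hg]; rfl
          have hAcont : (pvAFold q).contains p.1 = false := by
            rw [PySem.Dict.contains_eq_isSome_get?, hAget]; rfl
          have hBitems : (pvGroups (q ++ [p])).items = (pvGroups q).items ++ [(p.1, [p])] := by
            rw [hBmod, hgd, PySem.Dict.items_insert_of_not_contains _ _ hcont]
            rfl
          constructor
          · rw [hA, hAget]
            simp only [PySem.Dict.items_insert_of_not_contains _ _ hAcont, hBitems,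
              List.map_append, List.map_cons, List.map_nil, hitems]
            rfl
          · intro kv hkv
            rw [hBitems] at hkv
            rcases List.mem_append.mp hkv with h | h
            · exact hne kv h
            · simp at h; simp [h]
      | some pkts =>
          have hmem : (p.1, pkts) ∈ (pvGroups q).items := PySem.Dict.mem_items_of_get?_eq_some _ hg
          have hpne : pkts ≠ [] := hne _ hmem
          have hcont : (pvGroups q).contains p.1 = true := by
            rw [PySem.Dict.contains_eq_isSome_get?, hg]; rfl
          have hgd : (pvGroups q).getD p.1 [] = pkts := PySem.Dict.getD_of_get?_eq_some _ _ hg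
          have hAget : (pvAFold q).get? p.1 = some (pvMinSnd pkts) := by rw [hget, hg]; rfl
          have hAcont : (pvAFold q).contains p.1 = true := by
            rw [PySem.Dict.contains_eq_isSome_get?, hAget]; rfl
          have hBitems : (pvGroups (q ++ [p])).items =
              (pvGroups q).items.map (fun kv => if kv.1 == p.1 then (p.1, pkts ++ [p]) else kv) := by
            rw [hBmod, hgd, PySem.Dict.items_insert_of_contains _ _ hcont]
          -- any entry of B's items with key p.1 IS (p.1, pkts)
          have hkey : ∀ kv ∈ (pvGroups q).items, kv.1 = p.1 → kv.2 = pkts := by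
            intro kv hkv hk
            have := PySem.Dict.get?_of_mem_items (d := pvGroups q) (k := kv.1) (v := kv.2)
              (by exact hkv) hnodup
            rw [hk, hg] at this
            exact (Option.some.inj this).symm
          have hmin := pvMinSnd_append pkts p hpne
          constructor
          · rw [hA, hAget]
            by_cases hcmp : (pvMinSnd pkts).2 > p.2
            · simp only [hcmp, if_pos]
              rw [PySem.Dict.items_insert_of_contains _ _ hAcont, hitems, hBitems,
                List.map_map, List.map_map]
              apply List.map_congr_left
              intro kv hkv
              by_cases hk : kv.1 = p.1
              · have h2 : kv.2 = pkts := hkey kv hkv hk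
                simp only [Function.comp, hk, h2, beq_self_eq_true, if_pos, hmin]
                have : p.2 < (pvMinSnd pkts).2 := hcmp
                simp [this]
              · simp [Function.comp, hk]
            · simp only [hcmp, if_neg, not_false_iff]
              rw [hitems, hBitems, List.map_map]
              apply List.map_congr_left
              intro kv hkv
              by_cases hk : kv.1 = p.1
              · have h2 : kv.2 = pkts := hkey kv hkv hk
                have hnl : ¬ p.2 < (pvMinSnd pkts).2 := hcmp
                simp [Function.comp, hk, h2, hmin, hnl]
              · simp [Function.comp, hk]
          · intro kv hkv
            rw [hBitems] at hkv
            obtain ⟨kv0, hkv0, hkveq⟩ := List.mem_map.mp hkv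
            by_cases hk : kv0.1 == p.1
            · rw [if_pos hk] at hkveq
              subst hkveq; simp
            · rw [if_neg hk] at hkveq
              subst hkveq; exact hne _ hkv0

-- ===== VERDICT (by name: the statement is the Claim_ definition above) =====
theorem top_prioritys_spec : Claim_equal_top_prioritys := by
  intro queue _
  unfold Spec_top_prioritys top_prioritys_alt
  rw [pvAFold_items, (pvMain queue).1]
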